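-- pv_equiv track=rewrite | github.com/Common-Longitudinal-ICU-data-Format/CLIF-TableOne | modules/utils/validation_formatter.py | categorize_errors
-- ===== SOURCE A (Python) =====
-- from typing import Dict, Any, List
--
-- def categorize_errors(formatted_errors: List[Dict[str, Any]]) -> Dict[str, List[Dict[str, Any]]]:
--     """
--     Categorize formatted errors into schema, data quality, and other categories.
--
--     Args:
--         formatted_errors: List of formatted error dictionaries
--
--     Returns:
--         Dictionary with categorized errors
--     """
--     schema_errors = []
--     data_quality_issues = []
--     other_errors = []
--
--     for error in formatted_errors:
--         if error['category'] == 'schema':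
--             schema_errors.append(error)
--         elif error['category'] == 'data_quality':
--             data_quality_issues.append(error)
--         else:
--             other_errors.append(error)
--
--     return {
--         'schema_errors': schema_errors,
--         'data_quality_issues': data_quality_issues,
--         'other_errors': other_errors
--     }
-- ===== SOURCE B (Python) =====
-- def categorize_errors(formatted_errors):
--     """Categorize formatted errors into schema, data quality, and other categories."""
--     return {
--         'schema_errors': [e for e in formatted_errors if e['category'] == 'schema'],
--         'data_quality_issues': [e for e in formatted_errors if e['category'] == 'data_quality'],
--         'other_errors': [e for e in formatted_errors if e['category'] not in ('schema', 'data_quality')],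
--     }
-- ===== Notes on version B (the rewrite author's own statement) =====
-- stated objective: simpler
-- what changed: Replaces the single three-branch accumulator loop with three independent filtering comprehensions, one per output list, assembled directly into the result dict.
import Mathlib
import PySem

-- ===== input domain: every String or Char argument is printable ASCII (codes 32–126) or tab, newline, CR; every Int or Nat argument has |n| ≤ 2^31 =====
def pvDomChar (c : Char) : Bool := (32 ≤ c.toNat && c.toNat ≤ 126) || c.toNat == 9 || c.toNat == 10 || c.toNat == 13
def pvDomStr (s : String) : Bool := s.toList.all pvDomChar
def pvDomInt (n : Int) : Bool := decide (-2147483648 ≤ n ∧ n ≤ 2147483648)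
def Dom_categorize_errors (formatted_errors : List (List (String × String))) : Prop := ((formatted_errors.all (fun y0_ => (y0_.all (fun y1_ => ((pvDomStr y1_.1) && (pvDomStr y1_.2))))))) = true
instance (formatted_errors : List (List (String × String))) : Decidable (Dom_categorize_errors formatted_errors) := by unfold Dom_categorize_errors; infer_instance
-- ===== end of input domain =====

-- B replaces A's single three-branch accumulator loop with three independent filters (simpler decomposition).


-- ===== PORT A =====
-- error['category']: first-match lookup in the association list (Pre_ guarantees the key is present,
-- so the "" default is never consulted on admitted inputs)
def pvCat (e : List (String × String)) : String :=
  ((e.find? (fun p => p.1 == "category")).map (fun p => p.2)).getD ""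

def categorize_errors (formatted_errors : List (List (String × String))) :
    List (String × List (List (String × String))) :=
  let st := formatted_errors.foldl
    (fun (acc : List (List (String × String)) × List (List (String × String)) × List (List (String × String))) e =>
      if pvCat e == "schema" then (acc.1 ++ [e], acc.2.1, acc.2.2)
      else if pvCat e == "data_quality" then (acc.1, acc.2.1 ++ [e], acc.2.2)
      else (acc.1, acc.2.1, acc.2.2 ++ [e]))
    ([], [], [])
  [("schema_errors", st.1), ("data_quality_issues", st.2.1), ("other_errors", st.2.2)]

-- ===== PORT B =====
def categorize_errors_alt (formatted_errors : List (List (String × String))) :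
    List (String × List (List (String × String))) :=
  [("schema_errors", formatted_errors.filter (fun e => pvCat e == "schema")),
   ("data_quality_issues", formatted_errors.filter (fun e => pvCat e == "data_quality")),
   ("other_errors", formatted_errors.filter (fun e => !(pvCat e == "schema") && !(pvCat e == "data_quality")))]

-- ===== PRECONDITION & SPEC =====
-- Pre_ excludes exactly the inputs where some error dict has no 'category' key: Python A raises KeyError there (B too).
def Pre_categorize_errors (formatted_errors : List (List (String × String))) : Prop :=
  (formatted_errors.all (fun e => e.any (fun p => p.1 == "category"))) = true
instance (formatted_errors : List (List (String × String))) : Decidable (Pre_categorize_errors formatted_errors) := by unfold Pre_categorize_errors; infer_instance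

def pvWitness_categorize_errors : (List (List (String × String))) :=
  [[("category", "schema"), ("msg", "a")], [("category", "oops")]]

def Spec_categorize_errors (formatted_errors : List (List (String × String))) (out : List (String × List (List (String × String)))) : Prop := out = categorize_errors_alt formatted_errors
instance (formatted_errors : List (List (String × String))) (out : List (String × List (List (String × String)))) : Decidable (Spec_categorize_errors formatted_errors out) := by unfold Spec_categorize_errors; infer_instance

-- ===== CLAIM (what is proved, stated in full; the proofs are below) =====
def Claim_equal_categorize_errors : Prop := ∀ (formatted_errors : List (List (String × String))), Dom_categorize_errors formatted_errors → Pre_categorize_errors formatted_errors → Spec_categorize_errors formatted_errors (categorize_errors formatted_errors)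

-- ===== LEMMAS AND PROOFS =====
-- loop invariant: the fold's state is the three accumulators extended by the three filters
theorem categorize_errors_fold (fe : List (List (String × String)))
    (a b c : List (List (String × String))) :
    fe.foldl
      (fun (acc : List (List (String × String)) × List (List (String × String)) × List (List (String × String))) e =>
        if pvCat e == "schema" then (acc.1 ++ [e], acc.2.1, acc.2.2)
        else if pvCat e == "data_quality" then (acc.1, acc.2.1 ++ [e], acc.2.2)
        else (acc.1, acc.2.1, acc.2.2 ++ [e]))
      (a, b, c)
    = (a ++ fe.filter (fun e => pvCat e == "schema"),
       b ++ fe.filter (fun e => pvCat e == "data_quality"),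
       c ++ fe.filter (fun e => !(pvCat e == "schema") && !(pvCat e == "data_quality"))) := by
  induction fe generalizing a b c with
  | nil => simp
  | cons e t ih =>
    rw [List.foldl_cons]
    by_cases h1 : pvCat e == "schema"
    · rw [if_pos h1, ih]
      simp [List.filter_cons, eq_of_beq h1]
    · by_cases h2 : pvCat e == "data_quality"
      · rw [if_neg h1, if_pos h2, ih]
        simp [List.filter_cons, h1, eq_of_beq h2]
      · rw [if_neg h1, if_neg h2, ih]
        simp [List.filter_cons, h1, h2]

-- ===== VERDICT (by name: the statement is the Claim_ definition above) =====
theorem categorize_errors_spec : Claim_equal_categorize_errors := by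
  intro fe _ _
  unfold Spec_categorize_errors categorize_errors categorize_errors_alt
  rw [categorize_errors_fold]
  simp
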